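-- pv_equiv track=rewrite | github.com/storborg/axibot | axibot/svg.py | add_pen_up_moves
-- ===== SOURCE A (Python) =====
-- def add_pen_up_moves(segments):
--     """
--     Takes a list of pen-down segments. Returns a list of (segment, pen_up)
--     tuples, with additional segments added that pen-up move between segments.
--     Also add segments at the beginning and end to do pen-up moves from and to
--     the origin location.
--
--     The output list should thus always have 2n+1 elements, where n is the
--     length of the input list.
--     """
--     assert segments
--     origin = 0, 0
--
--     out_segments = []
--     start_seg = [origin, segments[0][0]]
--     out_segments.append((start_seg, True))
--
--     count = len(segments)
--
--     for n, seg in enumerate(segments, start=1):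
--         assert seg
--         out_segments.append((seg, False))
--         if n == count:
--             # last one
--             next_seg_start = origin
--         else:
--             next_seg_start = segments[n][0]
--         inter_seg = [seg[-1], next_seg_start]
--         out_segments.append((inter_seg, True))
--
--     return out_segments
-- ===== SOURCE B (Python) =====
-- def add_pen_up_moves(segments):
--     assert segments
--     origin = (0, 0)
--
--     def rec(prev, segs):
--         # pen-up move from prev to the next target (or origin when done),
--         # then the segment itself, then recurse with its endpoint as prev
--         if not segs:
--             return [([prev, origin], True)]
--         seg = segs[0]
--         return [([prev, seg[0]], True), (seg, False)] + rec(seg[-1], segs[1:])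
--
--     return rec(origin, segments)
-- ===== Notes on version B (the rewrite author's own statement) =====
-- stated objective: simpler
-- what changed: B is a structural recursion that threads the previous pen position through the call (pen-up from prev to the head segment's start, emit the segment, recurse with its endpoint), replacing A's iterative enumerate loop with forward lookahead indexing and its n==count special case.
import Mathlib
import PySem

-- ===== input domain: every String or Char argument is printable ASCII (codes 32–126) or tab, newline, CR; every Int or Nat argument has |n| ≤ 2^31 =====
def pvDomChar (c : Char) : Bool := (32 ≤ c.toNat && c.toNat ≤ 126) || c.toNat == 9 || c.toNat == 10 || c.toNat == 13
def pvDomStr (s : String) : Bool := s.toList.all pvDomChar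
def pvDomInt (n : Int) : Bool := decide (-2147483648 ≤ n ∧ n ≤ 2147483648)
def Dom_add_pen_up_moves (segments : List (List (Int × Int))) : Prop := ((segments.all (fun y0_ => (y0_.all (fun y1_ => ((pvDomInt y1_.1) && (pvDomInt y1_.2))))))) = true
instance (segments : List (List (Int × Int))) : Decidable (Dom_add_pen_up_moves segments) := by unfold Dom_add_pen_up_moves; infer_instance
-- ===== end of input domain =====

-- B replaces A's iterative enumerate loop (with forward lookahead indexing and an n == count
-- special case) by a structural recursion threading the previous pen position; same O(n) cost,
-- simpler decomposition.

-- ===== PORT A =====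
-- Literal port of A. Python raises (assert/IndexError) on an empty segment list or an empty
-- segment; those inputs are outside Pre_ below, and there the pyGetD defaults are never reached.
def add_pen_up_moves (segments : List (List (Int × Int))) : List ((List (Int × Int)) × Bool) :=
  let origin : Int × Int := (0, 0)
  let start_seg : List (Int × Int) :=
    [origin, PySem.List.pyGetD (PySem.List.pyGetD segments 0 []) 0 origin]
  let out_segments : List ((List (Int × Int)) × Bool) := [(start_seg, true)]
  let count : Int := segments.length
  (PySem.List.enumerate segments 1).foldl
    (fun out p =>
      let n := p.1
      let seg := p.2
      let out := out ++ [(seg, false)]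
      let next_seg_start : Int × Int :=
        if n == count then origin
        else PySem.List.pyGetD (PySem.List.pyGetD segments n []) 0 origin
      let inter_seg : List (Int × Int) := [PySem.List.pyGetD seg (-1) origin, next_seg_start]
      out ++ [(inter_seg, true)]) out_segments

-- ===== PORT B =====
-- B's inner recursive helper `rec(prev, segs)`
def pvRecB (prev : Int × Int) (segs : List (List (Int × Int))) :
    List ((List (Int × Int)) × Bool) :=
  match segs with
  | [] => [([prev, (0, 0)], true)]
  | seg :: rest =>
      [([prev, PySem.List.pyGetD seg 0 (0, 0)], true), (seg, false)] ++
        pvRecB (PySem.List.pyGetD seg (-1) (0, 0)) rest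

def add_pen_up_moves_alt (segments : List (List (Int × Int))) : List ((List (Int × Int)) × Bool) :=
  pvRecB (0, 0) segments

-- ===== PRECONDITION & SPEC =====
-- Pre_ excludes exactly the inputs where the Python A raises: an empty segment list
-- (AssertionError) or some empty segment (IndexError/AssertionError).
def Pre_add_pen_up_moves (segments : List (List (Int × Int))) : Prop :=
  segments ≠ [] ∧ ∀ s ∈ segments, s ≠ []
instance (segments : List (List (Int × Int))) : Decidable (Pre_add_pen_up_moves segments) := by
  unfold Pre_add_pen_up_moves; infer_instance
def pvWitness_add_pen_up_moves : (List (List (Int × Int))) := ([[(1, 2)], [(3, 4), (5, 6)]])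
def Spec_add_pen_up_moves (segments : List (List (Int × Int))) (out : List ((List (Int × Int)) × Bool)) : Prop := out = add_pen_up_moves_alt segments
instance (segments : List (List (Int × Int))) (out : List ((List (Int × Int)) × Bool)) : Decidable (Spec_add_pen_up_moves segments out) := by unfold Spec_add_pen_up_moves; infer_instance

-- ===== CLAIM (what is proved, stated in full; the proofs are below) =====
def Claim_equal_add_pen_up_moves : Prop := ∀ (segments : List (List (Int × Int))), Dom_add_pen_up_moves segments → Pre_add_pen_up_moves segments → Spec_add_pen_up_moves segments (add_pen_up_moves segments)

-- ===== LEMMAS AND PROOFS =====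

-- the start point of the pen-up move leaving a segment, as produced when `rest` follows it
def pvNext (rest : List (List (Int × Int))) : Int × Int :=
  match rest with
  | [] => (0, 0)
  | t :: _ => PySem.List.pyGetD t 0 (0, 0)

-- common shape of both ports' output, from the second element on
def pvG : List (List (Int × Int)) → List ((List (Int × Int)) × Bool)
  | [] => []
  | s :: rest =>
      (s, false) :: ([PySem.List.pyGetD s (-1) (0, 0), pvNext rest], true) :: pvG rest

theorem pvA_loop (full : List (List (Int × Int))) :
    ∀ (suffix : List (List (Int × Int))) (k : Nat)
      (acc : List ((List (Int × Int)) × Bool)), full.drop k = suffix →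
    (PySem.List.enumerate suffix ((k : Int) + 1)).foldl
      (fun out p =>
        (out ++ [(p.2, false)]) ++
          [([PySem.List.pyGetD p.2 (-1) (0, 0),
             if p.1 == (full.length : Int) then (0, 0)
             else PySem.List.pyGetD (PySem.List.pyGetD full p.1 []) 0 (0, 0)], true)]) acc
    = acc ++ pvG suffix := by
  intro suffix
  induction suffix with
  | nil => intro k acc _; simp [PySem.List.enumerate_nil, pvG]
  | cons s rest ih =>
      intro k acc hdrop
      have hk : k < full.length := by
        by_contra h
        simp [List.drop_eq_nil_of_le (Nat.le_of_not_lt h)] at hdrop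
      have hrest : full.drop (k + 1) = rest := by
        have := congrArg List.tail hdrop
        simpa [List.tail_drop] using this
      rw [PySem.List.enumerate_cons, List.foldl_cons]
      have hcast : (k : Int) + 1 = ((k + 1 : Nat) : Int) := by push_cast; ring
      have hnext :
          (if ((k : Int) + 1) == (full.length : Int) then ((0 : Int), (0 : Int))
           else PySem.List.pyGetD (PySem.List.pyGetD full ((k : Int) + 1) []) 0 (0, 0))
          = pvNext rest := by
        cases rest with
        | nil =>
            have hlen : k + 1 = full.length := by
              have : full.length - (k + 1) = 0 := by
                simpa using congrArg List.length hrest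
              omega
            simp [pvNext, hcast, hlen]
        | cons t ts =>
            have hlt : k + 1 < full.length := by
              have : full.length - (k + 1) = ts.length + 1 := by
                simpa using congrArg List.length hrest
              omega
            have hne : ((k : Int) + 1) ≠ (full.length : Int) := by
              intro h; omega
            have hget : PySem.List.pyGetD full ((k : Int) + 1) [] = t := by
              rw [hcast, PySem.List.pyGetD_natCast]
              have hg : full[k + 1]? = some t := by
                have h := List.getElem?_drop (xs := full) (i := k + 1) (j := 0)
                rw [hrest] at h
                simpa using h.symm
              simp [List.getD, hg]
            simp [pvNext, hne, hget]
      rw [hnext]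
      rw [show ((k : Int) + 1 + 1) = ((k + 1 : Nat) : Int) + 1 by push_cast; ring]
      rw [ih (k + 1) _ hrest]
      simp [pvG]

theorem pvA_eq (segments : List (List (Int × Int))) :
    add_pen_up_moves segments =
      ([(0, 0), pvNext segments], true) :: pvG segments := by
  unfold add_pen_up_moves
  simp only []
  have h0 : segments.drop 0 = segments := by simp
  have := pvA_loop segments segments 0 [([(0, 0),
      PySem.List.pyGetD (PySem.List.pyGetD segments 0 []) 0 (0, 0)], true)] h0
  rw [show ((0 : Nat) : Int) + 1 = (1 : Int) by norm_num] at this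
  rw [this]
  have hhead : PySem.List.pyGetD (PySem.List.pyGetD segments 0 []) 0 (0, 0)
      = pvNext segments := by
    cases segments with
    | nil => simp [PySem.List.pyGetD, PySem.List.pyGet?, PySem.List.pyIdx?, pvNext]
    | cons s rest => simp [PySem.List.pyGetD_zero_cons, pvNext]
  rw [hhead]
  simp

theorem pvB_rec (segs : List (List (Int × Int))) : ∀ (prev : Int × Int),
    pvRecB prev segs = ([prev, pvNext segs], true) :: pvG segs := by
  induction segs with
  | nil => intro prev; simp [pvRecB, pvNext, pvG]
  | cons s rest ih =>
      intro prev
      simp [pvRecB, ih, pvNext, pvG]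

theorem pvB_eq (segments : List (List (Int × Int))) :
    add_pen_up_moves_alt segments =
      ([(0, 0), pvNext segments], true) :: pvG segments := by
  unfold add_pen_up_moves_alt
  exact pvB_rec segments (0, 0)

-- ===== VERDICT (by name: the statement is the Claim_ definition above) =====
theorem add_pen_up_moves_spec : Claim_equal_add_pen_up_moves := by
  intro segments _ _
  unfold Spec_add_pen_up_moves
  rw [pvA_eq, pvB_eq]
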